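-- pv_equiv track=rewrite | github.com/MrBrantCode/unitest_baseline | mut_generate/mist_train_cf/cf_36697/solution.py | process_code_snippet
-- ===== SOURCE A (Python) =====
-- from typing import Tuple
--
-- def process_code_snippet(code: str, file_path: str) -> Tuple[str, str]:
--     lines = code.split('\n')
--     code_desc = file_path
--     line_numbered_snippet = ''
--     for i, line in enumerate(lines, start=1):
--         line_numbered_snippet += f"{i}. {line}\n"
--         if line.strip().startswith('##'):
--             code_desc = line.strip().lstrip('#').strip()
--     return code_desc, line_numbered_snippet
-- ===== SOURCE B (Python) =====
-- def process_code_snippet(code, file_path):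
--     lines = code.split('\n')
--     snippet = ''.join(f"{i}. {line}\n" for i, line in enumerate(lines, start=1))
--     code_desc = file_path
--     for line in reversed(lines):
--         s = line.strip()
--         if s.startswith('##'):
--             code_desc = s.lstrip('#').strip()
--             break
--     return code_desc, snippet
-- ===== Notes on version B (the rewrite author's own statement) =====
-- stated objective: alternative
-- what changed: Replaces A's single forward loop that builds the snippet incrementally and overwrites the description on every '##' line with two independent passes: a join over enumerate for the snippet, and a backwards scan with early break that stops at the first (i.e. last) '##' line.
import Mathlib
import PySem

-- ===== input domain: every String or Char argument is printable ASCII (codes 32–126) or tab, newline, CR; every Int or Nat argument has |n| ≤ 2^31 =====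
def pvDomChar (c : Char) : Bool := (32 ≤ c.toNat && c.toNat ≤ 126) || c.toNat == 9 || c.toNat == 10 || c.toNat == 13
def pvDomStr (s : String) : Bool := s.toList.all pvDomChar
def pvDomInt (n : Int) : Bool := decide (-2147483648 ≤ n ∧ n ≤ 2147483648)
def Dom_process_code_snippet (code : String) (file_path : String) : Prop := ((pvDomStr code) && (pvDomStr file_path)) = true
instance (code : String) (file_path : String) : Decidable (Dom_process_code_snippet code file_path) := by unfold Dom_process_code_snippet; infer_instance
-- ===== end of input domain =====

-- B replaces A's single forward loop (snippet accumulation + description overwriting) by two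
-- independent passes: a join over enumerate for the snippet, and a backwards early-break scan
-- for the last '##' description (objective: alternative decomposition, same cost).
-- Strings are handled as List Char internally (PySem.Chars), exact on the ASCII domain.

-- ===== PORT A =====
-- Python's line.lstrip('#'): drop leading '#' characters (exact; hand-ported, single-char set)
def pvLstripHash (s : List Char) : List Char := s.dropWhile (· == '#')

-- A's for-loop over enumerate(lines, 1), carrying (i, code_desc, snippet) as state
def pvA_loop : Int → List Char → List Char → List (List Char) → List Char × List Char
  | _, desc, snip, [] => (desc, snip)
  | i, desc, snip, line :: rest =>
      let snip' := snip ++ (PySem.Int.toStr i).toList ++ ". ".toList ++ line ++ ['\n']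
      let desc' := if PySem.Chars.startswith (PySem.Chars.strip line) "##".toList
                   then PySem.Chars.strip (pvLstripHash (PySem.Chars.strip line))
                   else desc
      pvA_loop (i + 1) desc' snip' rest

def process_code_snippet (code : String) (file_path : String) : String × String :=
  let lines := PySem.Chars.splitOn code.toList "\n".toList
  let r := pvA_loop 1 file_path.toList [] lines
  (String.ofList r.1, String.ofList r.2)

-- ===== PORT B =====
-- Source B's backwards scan: first '##' line of the reversed list, else the default
def pvB_findDesc : List (List Char) → List Char → List Char
  | [], fp => fp
  | line :: rest, fp =>
      let s := PySem.Chars.strip line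
      if PySem.Chars.startswith s "##".toList
      then PySem.Chars.strip (s.dropWhile (· == '#'))
      else pvB_findDesc rest fp

def process_code_snippet_alt (code : String) (file_path : String) : String × String :=
  let lines := PySem.Chars.splitOn code.toList "\n".toList
  let snippet := PySem.Chars.join []
      ((PySem.List.enumerate lines 1).map
        (fun p => (PySem.Int.toStr p.1).toList ++ ". ".toList ++ p.2 ++ ['\n']))
  let desc := pvB_findDesc lines.reverse file_path.toList
  (String.ofList desc, String.ofList snippet)

-- ===== PRECONDITION & SPEC =====
def Spec_process_code_snippet (code : String) (file_path : String) (out : String × String) : Prop := out = process_code_snippet_alt code file_path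
instance (code : String) (file_path : String) (out : String × String) : Decidable (Spec_process_code_snippet code file_path out) := by unfold Spec_process_code_snippet; infer_instance

-- ===== CLAIM (what is proved, stated in full; the proofs are below) =====
def Claim_equal_process_code_snippet : Prop := ∀ (code : String) (file_path : String), Dom_process_code_snippet code file_path → Spec_process_code_snippet code file_path (process_code_snippet code file_path)

-- ===== LEMMAS AND PROOFS =====

theorem pvJoin_nil_eq_flatten (l : List (List Char)) : PySem.Chars.join [] l = l.flatten := by
  induction l with
  | nil => simp [PySem.Chars.join_nil]
  | cons a t ih =>
    cases t with
    | nil => simp [PySem.Chars.join_singleton]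
    | cons b t' => simp [PySem.Chars.join_cons_cons, ih]

theorem pvB_findDesc_append (xs ys : List (List Char)) (d : List Char) :
    pvB_findDesc (xs ++ ys) d = pvB_findDesc xs (pvB_findDesc ys d) := by
  induction xs with
  | nil => simp [pvB_findDesc]
  | cons a t ih => simp only [List.cons_append, pvB_findDesc, ih]

theorem pvA_loop_eq (lines : List (List Char)) :
    ∀ (i : Int) (d s : List Char),
      pvA_loop i d s lines =
        (pvB_findDesc lines.reverse d,
         s ++ ((PySem.List.enumerate lines i).map
           (fun p => (PySem.Int.toStr p.1).toList ++ ". ".toList ++ p.2 ++ ['\n'])).flatten) := by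
  induction lines with
  | nil => intro i d s; simp [pvA_loop, pvB_findDesc, PySem.List.enumerate_nil]
  | cons line rest ih =>
    intro i d s
    simp only [pvA_loop, ih, PySem.List.enumerate_cons, List.map_cons, List.flatten_cons,
      List.reverse_cons, pvB_findDesc_append]
    refine congrArg₂ Prod.mk ?_ ?_
    · congr 1
    · simp

theorem process_code_snippet_eq_alt (code file_path : String) :
    process_code_snippet code file_path = process_code_snippet_alt code file_path := by
  simp only [process_code_snippet, process_code_snippet_alt, pvA_loop_eq, pvJoin_nil_eq_flatten, List.nil_append]

-- ===== VERDICT (by name: the statement is the Claim_ definition above) =====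
theorem process_code_snippet_spec : Claim_equal_process_code_snippet := by
  intro code file_path _
  unfold Spec_process_code_snippet
  exact process_code_snippet_eq_alt code file_path
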